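-- pv_equiv track=rewrite | github.com/hacksman/shino | shino/seed_generator/url_generator.py | __parse_many
-- ===== SOURCE A (Python) =====
-- from functools import reduce
--
-- def __parse_many(many_items):
--
--     field_k_v = []
--     for k, values in many_items.items():
--         design = []
--         for v in values:
--             v_r = f"{k}={v}"
--             design.append(v_r)
--         field_k_v.append(design)
--
--     def pack_result(a, b):
--         result = []
--         for per_a in a:
--             for per_b in b:
--                 c = f"{per_a}&{per_b}"
--                 result.append(c)
--         return result
--
--     result = reduce(pack_result, field_k_v)
--
--     return result
-- ===== SOURCE B (Python) =====
-- def __parse_many(many_items):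
--     # Mixed-radix indexing: the t-th combination is decoded directly from t,
--     # last key varying fastest (same order as A's left fold).
--     items = list(many_items.items())
--     total = 1
--     for _, values in items:
--         total *= len(values)
--     result = []
--     for i in range(total):
--         parts = []
--         rem = i
--         for k, values in reversed(items):
--             rem, j = divmod(rem, len(values))
--             parts.append(f"{k}={values[j]}")
--         parts.reverse()
--         result.append("&".join(parts))
--     return result
-- ===== Notes on version B (the rewrite author's own statement) =====
-- stated objective: alternative
-- what changed: Replaces A's reduce of a pairwise nested-loop product (which materialises every intermediate prefix list) with direct mixed-radix decoding: the i-th output string is computed straight from the index i by repeated divmod over the value-list lengths, so no intermediate combination lists are ever built.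
-- outside the precondition, e.g. on __parse_many({}): A raises TypeError, B returns ['']
import Mathlib
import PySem

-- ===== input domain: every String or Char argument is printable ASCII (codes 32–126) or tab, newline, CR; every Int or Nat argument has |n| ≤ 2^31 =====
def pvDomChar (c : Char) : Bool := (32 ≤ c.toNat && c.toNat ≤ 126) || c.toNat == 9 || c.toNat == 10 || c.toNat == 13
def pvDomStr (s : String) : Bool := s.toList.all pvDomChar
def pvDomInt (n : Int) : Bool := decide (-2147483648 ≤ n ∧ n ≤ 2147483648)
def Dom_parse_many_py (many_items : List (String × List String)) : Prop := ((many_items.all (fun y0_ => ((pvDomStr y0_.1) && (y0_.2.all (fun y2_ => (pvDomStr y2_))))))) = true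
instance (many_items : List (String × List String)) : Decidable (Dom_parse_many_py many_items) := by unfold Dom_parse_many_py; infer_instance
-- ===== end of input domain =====

-- B replaces A's reduce over pairwise nested-loop products with direct mixed-radix
-- decoding of each output index (alternative algorithm, no intermediate combination lists).
-- ===== PORT A =====
-- helper: A's inner 'pack_result(a, b)' — nested loops appending 'per_a & per_b'
def parse_many_py_pack (a b : List String) : List String :=
  a.foldl (fun result per_a =>
    b.foldl (fun result per_b => result ++ [per_a ++ "&" ++ per_b]) result) []

def parse_many_py (many_items : List (String × List String)) : List String :=
  let field_k_v := many_items.foldl (fun acc kv =>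
    acc ++ [kv.2.foldl (fun design v => design ++ [kv.1 ++ "=" ++ v]) []]) []
  -- reduce(pack_result, field_k_v): raises TypeError on an empty list (excluded by Pre_)
  match field_k_v with
  | [] => []
  | h :: t => t.foldl parse_many_py_pack h

-- ===== PORT B =====
-- helper: one step of Source B's inner loop over reversed(items):
-- 'rem, j = divmod(rem, len(values)); parts.append(f"{k}={values[j]}")'.
-- The loop body only runs when total > 0, so len(values) > 0 and the
-- pyGet? lookup is always in range; '.getD ""' is unreachable padding.
def pvDecodeStep (st : Int × List String) (kv : String × List String) : Int × List String :=
  (PySem.Int.floordiv st.1 (kv.2.length : Int),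
   st.2 ++ [kv.1 ++ "=" ++ (PySem.List.pyGet? kv.2 (PySem.Int.mod st.1 (kv.2.length : Int))).getD ""])

def parse_many_py_alt (many_items : List (String × List String)) : List String :=
  let total : Int := many_items.foldl (fun t kv => t * (kv.2.length : Int)) 1
  (PySem.List.pyRange 0 total 1).map (fun i =>
    let st := many_items.reverse.foldl pvDecodeStep (i, [])
    PySem.Str.join "&" st.2.reverse)

-- ===== PRECONDITION & SPEC =====
-- Pre_ excludes only the empty dict, on which A's reduce raises TypeError (empty iterable);
-- B there naturally returns [''] (the empty combination).
def Pre_parse_many_py (many_items : List (String × List String)) : Prop :=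
  many_items ≠ []
instance (many_items : List (String × List String)) : Decidable (Pre_parse_many_py many_items) := by
  unfold Pre_parse_many_py; infer_instance

def pvWitness_parse_many_py : (List (String × List String)) :=
  [("a", ["1", "2"]), ("b", ["x"])]

def Spec_parse_many_py (many_items : List (String × List String)) (out : List String) : Prop :=
  out = parse_many_py_alt many_items
instance (many_items : List (String × List String)) (out : List String) : Decidable (Spec_parse_many_py many_items out) := by
  unfold Spec_parse_many_py; infer_instance

-- ===== CLAIM (what is proved, stated in full; the proofs are below) =====
def Claim_equal_parse_many_py : Prop := ∀ (many_items : List (String × List String)), Dom_parse_many_py many_items → Pre_parse_many_py many_items → Spec_parse_many_py many_items (parse_many_py many_items)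

-- ===== LEMMAS AND PROOFS =====

-- common reference form: the Cartesian product of the per-key 'k=v' lists
-- (first coordinate varies slowest, like both programs)
def pvToKV (kv : String × List String) : List String := kv.2.map (fun v => kv.1 ++ "=" ++ v)

def pvProduct (lists : List (List String)) : List (List String) :=
  match lists with
  | [] => [[]]
  | xs :: rest => xs.flatMap (fun x => (pvProduct rest).map (fun combo => x :: combo))

-- ---------- A-side: A equals map join over the product ----------

theorem pack_eq (a b : List String) :
    parse_many_py_pack a b = a.flatMap (fun pa => b.map (fun pb => pa ++ "&" ++ pb)) := by
  simp only [parse_many_py_pack, PySem.List.foldl_append_singleton_eq_map,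
             PySem.List.foldl_append_eq_flatMap, List.nil_append]

theorem chars_join_merge (sep p q : List Char) (rest : List (List Char)) :
    PySem.Chars.join sep (p :: q :: rest) = PySem.Chars.join sep ((p ++ sep ++ q) :: rest) := by
  cases rest with
  | nil => simp [PySem.Chars.join_cons_cons, PySem.Chars.join_singleton]
  | cons r rs => simp [PySem.Chars.join_cons_cons]

theorem join_amp_cons (x : String) (c : List String) :
    PySem.Str.join "&" (x :: c) = c.foldl (fun acc s => acc ++ "&" ++ s) x := by
  induction c generalizing x with
  | nil =>
    apply String.toList_inj.mp
    simp [PySem.Str.toList_join, PySem.Chars.join_singleton]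
  | cons y c ih =>
    rw [List.foldl_cons, ← ih (x ++ "&" ++ y)]
    apply String.toList_inj.mp
    simp only [PySem.Str.toList_join, List.map_cons, String.toList_append]
    exact chars_join_merge _ _ _ _

theorem foldl_pack_eq (l : List (List String)) (h : List String) :
    l.foldl parse_many_py_pack h
      = h.flatMap (fun a => (pvProduct l).map
          (fun combo => combo.foldl (fun acc s => acc ++ "&" ++ s) a)) := by
  induction l generalizing h with
  | nil => simp [pvProduct]
  | cons b rest ih =>
    rw [List.foldl_cons, ih, pack_eq]
    simp only [pvProduct, List.flatMap_assoc, List.flatMap_map]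
    refine List.flatMap_congr (fun a _ => ?_)
    rw [List.map_flatMap]
    refine List.flatMap_congr (fun pb _ => ?_)
    simp [Function.comp]

theorem a_eq_prod (many_items : List (String × List String)) (hne : many_items ≠ []) :
    parse_many_py many_items
      = (pvProduct (many_items.map pvToKV)).map (fun c => PySem.Str.join "&" c) := by
  unfold parse_many_py
  simp only [PySem.List.foldl_append_singleton_eq_map, List.nil_append]
  obtain ⟨kv, rest, hrw⟩ : ∃ kv rest, many_items = kv :: rest := by
    cases many_items with
    | nil => exact absurd rfl hne
    | cons kv rest => exact ⟨kv, rest, rfl⟩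
  subst hrw
  simp only [List.map_cons]
  rw [foldl_pack_eq]
  show _ = (pvProduct (pvToKV kv :: rest.map pvToKV)).map _
  simp only [pvProduct, pvToKV, List.flatMap_map, List.map_flatMap, List.map_map]
  refine (List.flatMap_congr (fun v _ => ?_)).symm
  refine List.map_congr_left (fun combo _ => ?_)
  simp [Function.comp, join_amp_cons]

-- ---------- B-side: the decode loop enumerates the product ----------

-- the inner loop's accumulated 'parts' factor out of the fold
theorem decode_acc (l : List (String × List String)) (i : Int) (p : List String) :
    l.foldl pvDecodeStep (i, p)
      = ((l.foldl pvDecodeStep (i, [])).1, p ++ (l.foldl pvDecodeStep (i, [])).2) := by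
  induction l generalizing i p with
  | nil => simp
  | cons kv l ih =>
    simp only [List.foldl_cons, pvDecodeStep]
    rw [ih (PySem.Int.floordiv i (kv.2.length : Int))
        (p ++ [kv.1 ++ "=" ++ (PySem.List.pyGet? kv.2 (PySem.Int.mod i (kv.2.length : Int))).getD ""]),
        ih (PySem.Int.floordiv i (kv.2.length : Int))
        ([] ++ [kv.1 ++ "=" ++ (PySem.List.pyGet? kv.2 (PySem.Int.mod i (kv.2.length : Int))).getD ""])]
    simp

-- decoded combination for index i
def pvDecode (items : List (String × List String)) (i : Int) : List String :=
  ((items.reverse.foldl pvDecodeStep (i, [])).2).reverse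

-- total as a Nat
def pvTotal (items : List (String × List String)) : Nat :=
  (items.map (fun kv => kv.2.length)).prod

theorem total_eq (items : List (String × List String)) :
    items.foldl (fun t kv => t * (kv.2.length : Int)) 1 = (pvTotal items : Int) := by
  suffices h : ∀ t : Int, items.foldl (fun t kv => t * (kv.2.length : Int)) t = t * (pvTotal items : Int) by
    simpa using h 1
  induction items with
  | nil => intro t; simp [pvTotal]
  | cons kv items ih =>
    intro t
    simp only [List.foldl_cons, ih, pvTotal, List.map_cons, List.prod_cons]
    push_cast
    ring

theorem total_append (ys : List (String × List String)) (kv : String × List String) :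
    pvTotal (ys ++ [kv]) = pvTotal ys * kv.2.length := by
  simp [pvTotal]

-- decoding q*n + r over ys ++ [kv] peels off the last coordinate
theorem decode_snoc (ys : List (String × List String)) (kv : String × List String)
    (q r : Nat) (hr : r < kv.2.length) :
    pvDecode (ys ++ [kv]) ((q * kv.2.length + r : Nat) : Int)
      = pvDecode ys (q : Nat) ++ [kv.1 ++ "=" ++ (kv.2[r]?.getD "")] := by
  unfold pvDecode
  rw [List.reverse_append]
  simp only [List.reverse_cons, List.reverse_nil, List.nil_append, List.singleton_append,
             List.foldl_cons]
  rw [decode_acc]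
  have hdiv : PySem.Int.floordiv ((q * kv.2.length + r : Nat) : Int) (kv.2.length : Int)
      = ((q : Nat) : Int) := by
    rw [PySem.Int.floordiv_natCast]
    congr 1
    rw [Nat.mul_comm q, Nat.mul_add_div (by omega : 0 < kv.2.length), Nat.div_eq_of_lt hr]
    omega
  have hmod : PySem.Int.mod ((q * kv.2.length + r : Nat) : Int) (kv.2.length : Int)
      = ((r : Nat) : Int) := by
    rw [PySem.Int.mod_natCast]
    congr 1
    rw [Nat.mul_comm q, Nat.mul_add_mod]
    exact Nat.mod_eq_of_lt hr
  simp only [pvDecodeStep, hdiv, hmod, List.nil_append, PySem.List.pyGet?_natCast,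
             List.reverse_append, List.reverse_cons, List.reverse_nil, List.nil_append]

-- Nat-level mixed-radix range split
theorem range_mul_flatMap (N n : Nat) :
    List.range (N * n) = (List.range N).flatMap (fun q => (List.range n).map (fun r => q * n + r)) := by
  induction N with
  | zero => simp
  | succ N ih =>
    rw [Nat.succ_mul, List.range_add, ih, List.range_succ, List.flatMap_append]
    simp [Nat.add_comm]

theorem product_snoc (ls : List (List String)) (zs : List String) :
    pvProduct (ls ++ [zs]) = (pvProduct ls).flatMap (fun c => zs.map (fun z => c ++ [z])) := by
  induction ls with
  | nil => induction zs <;> simp_all [pvProduct]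
  | cons xs ls ih =>
    simp only [List.cons_append, pvProduct, ih, List.flatMap_assoc]
    refine List.flatMap_congr (fun x _ => ?_)
    rw [List.flatMap_map, List.map_flatMap]
    refine List.flatMap_congr (fun c _ => ?_)
    simp [Function.comp]

-- main B-side invariant: mapping the decoder over 0..total enumerates the product
theorem decode_range_eq (items : List (String × List String)) :
    (List.range (pvTotal items)).map (fun k : Nat => pvDecode items (k : Int))
      = pvProduct (items.map pvToKV) := by
  induction items using List.reverseRecOn with
  | nil => simp [pvTotal, pvDecode, pvProduct]
  | append_singleton ys kv ih =>
    rw [total_append, range_mul_flatMap, List.map_flatMap, List.map_append]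
    simp only [List.map_cons, List.map_nil]
    rw [product_snoc, ← ih, List.flatMap_map]
    refine List.flatMap_congr (fun q _ => ?_)
    rw [List.map_map]
    have : ∀ r ∈ List.range kv.2.length,
        pvDecode (ys ++ [kv]) ((q * kv.2.length + r : Nat) : Int)
          = pvDecode ys (q : Nat) ++ [kv.1 ++ "=" ++ (kv.2[r]?.getD "")] := by
      intro r hr
      exact decode_snoc ys kv q r (List.mem_range.mp hr)
    rw [List.map_congr_left (fun r hr => by
      simp only [Function.comp]
      exact this r hr)]
    show _ = (pvToKV kv).map (fun z => pvDecode ys (q : Nat) ++ [z])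
    unfold pvToKV
    rw [List.map_map]
    apply List.ext_getElem
    · simp
    · intro k h1 h2
      have hk : k < kv.2.length := by simpa using h1
      simp [List.getElem?_eq_getElem hk]

theorem b_eq_prod (many_items : List (String × List String)) :
    parse_many_py_alt many_items
      = (pvProduct (many_items.map pvToKV)).map (fun c => PySem.Str.join "&" c) := by
  unfold parse_many_py_alt
  simp only [total_eq, PySem.List.pyRange_zero_natCast, List.map_map]
  rw [← decode_range_eq, List.map_map]
  rfl

-- ===== VERDICT (by name: the statement is the Claim_ definition above) =====
theorem parse_many_py_spec : Claim_equal_parse_many_py := by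
  intro many_items _ hpre
  unfold Spec_parse_many_py
  rw [a_eq_prod many_items hpre, b_eq_prod]
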